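-- pv_equiv track=rewrite | github.com/ncsulsj/Robust_Summarization | model_training/train.py | find_intervals_same
-- ===== SOURCE A (Python) =====
-- def find_intervals_same(lst, element):
--     intervals = []
--     i = 0
--     while i < len(lst):
--         if lst[i] == element:
--             start = i
--             i += 1
--             while i < len(lst) and lst[i] != element:
--                 i += 1
--             if i < len(lst):
--                 end = i
--                 intervals.append((start, end))
--         i += 1
--
--     return intervals
-- ===== SOURCE B (Python) =====
-- def find_intervals_same(lst, element):
--     intervals = []
--     pending = None
--     for i, x in enumerate(lst):
--         if x == element:
--             if pending is None:
--                 pending = i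
--             else:
--                 intervals.append((pending, i))
--                 pending = None
--     return intervals
-- ===== Notes on version B (the rewrite author's own statement) =====
-- stated objective: simpler
-- what changed: Replaced A's nested while-loop index state machine (outer scan + inner scan-to-next-occurrence with index jumps) by a single pass over enumerate(lst) carrying a pending start that toggles on each occurrence.
import Mathlib
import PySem

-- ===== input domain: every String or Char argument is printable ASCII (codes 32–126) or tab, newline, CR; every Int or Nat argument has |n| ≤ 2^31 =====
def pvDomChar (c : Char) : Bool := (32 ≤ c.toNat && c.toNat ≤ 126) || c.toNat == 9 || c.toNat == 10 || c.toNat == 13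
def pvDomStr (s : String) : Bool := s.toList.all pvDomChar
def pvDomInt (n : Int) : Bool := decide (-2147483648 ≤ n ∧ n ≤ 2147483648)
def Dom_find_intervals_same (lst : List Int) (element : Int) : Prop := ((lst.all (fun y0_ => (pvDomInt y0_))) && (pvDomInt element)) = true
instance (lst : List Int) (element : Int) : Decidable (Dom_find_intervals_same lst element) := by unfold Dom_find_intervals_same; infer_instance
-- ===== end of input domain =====

-- B replaces A's nested while-loop index state machine with one pass over enumerate(lst)
-- carrying a pending start (objective: simpler).

-- ===== PORT A =====
-- inner 'while i < len(lst) and lst[i] != element: i += 1' — returns the final i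
def innerA (lst : List Int) (element : Int) (i : Nat) : Nat :=
  if h : i < lst.length then
    if lst[i] ≠ element then innerA lst element (i + 1) else i
  else i
termination_by lst.length - i

-- the inner loop never moves i backwards (needed for the outer loop's termination)
theorem innerA_ge (lst : List Int) (element : Int) (i : Nat) : i ≤ innerA lst element i := by
  unfold innerA
  split
  · split
    · exact le_trans (Nat.le_succ i) (innerA_ge lst element (i + 1))
    · exact le_refl i
  · exact le_refl i
termination_by lst.length - i

-- outer 'while i < len(lst)' loop, accumulating 'intervals'
def outerA (lst : List Int) (element : Int) (i : Nat) (acc : List (Int × Int)) :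
    List (Int × Int) :=
  if h : i < lst.length then
    if lst[i] == element then
      -- start = i; i += 1; inner scan; conditional append; i += 1
      let j := innerA lst element (i + 1)
      if j < lst.length then outerA lst element (j + 1) (acc ++ [((i : Int), (j : Int))])
      else outerA lst element (j + 1) acc
    else outerA lst element (i + 1) acc
  else acc
termination_by lst.length - i
decreasing_by
  · have := innerA_ge lst element (i + 1); omega
  · have := innerA_ge lst element (i + 1); omega
  · omega

def find_intervals_same (lst : List Int) (element : Int) : List (Int × Int) :=
  outerA lst element 0 []

-- ===== PORT B =====
-- one step of B's for-loop: state = (intervals, pending)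
def stepB (element : Int) (st : List (Int × Int) × Option Int) (p : Int × Int) :
    List (Int × Int) × Option Int :=
  if p.2 == element then
    match st.2 with
    | none => (st.1, some p.1)
    | some s => (st.1 ++ [(s, p.1)], none)
  else st

def find_intervals_same_alt (lst : List Int) (element : Int) : List (Int × Int) :=
  ((PySem.List.enumerate lst 0).foldl (stepB element) ([], none)).1

-- ===== PRECONDITION & SPEC =====
def Spec_find_intervals_same (lst : List Int) (element : Int) (out : List (Int × Int)) : Prop := out = find_intervals_same_alt lst element
instance (lst : List Int) (element : Int) (out : List (Int × Int)) : Decidable (Spec_find_intervals_same lst element out) := by unfold Spec_find_intervals_same; infer_instance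

-- ===== CLAIM (what is proved, stated in full; the proofs are below) =====
def Claim_equal_find_intervals_same : Prop := ∀ (lst : List Int) (element : Int), Dom_find_intervals_same lst element → Spec_find_intervals_same lst element (find_intervals_same lst element)

-- ===== LEMMAS AND PROOFS =====

-- the occurrence indices of element in lst at positions ≥ i (index form, matching A)
def posFrom (lst : List Int) (element : Int) (i : Nat) : List Int :=
  if h : i < lst.length then
    if lst[i] == element then (i : Int) :: posFrom lst element (i + 1)
    else posFrom lst element (i + 1)
  else []
termination_by lst.length - i

-- the occurrence indices, structural form with a running counter (matching B)
def posL (element : Int) (xs : List Int) (s : Int) : List Int :=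
  match xs with
  | [] => []
  | x :: t => if x == element then s :: posL element t (s + 1) else posL element t (s + 1)

-- non-overlapping consecutive pairing, dropping an odd trailing element
def pairUp : List Int → List (Int × Int)
  | a :: b :: t => (a, b) :: pairUp t
  | _ => []

theorem posFrom_hit (lst : List Int) (element : Int) (i : Nat) (h : i < lst.length)
    (he : lst[i] = element) :
    posFrom lst element i = (i : Int) :: posFrom lst element (i + 1) := by
  rw [posFrom]; simp [h, he]

theorem posFrom_miss (lst : List Int) (element : Int) (i : Nat) (h : i < lst.length)
    (he : ¬ lst[i] = element) :
    posFrom lst element i = posFrom lst element (i + 1) := by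
  rw [posFrom]; simp [h, he]

theorem posFrom_end (lst : List Int) (element : Int) (i : Nat) (h : ¬ i < lst.length) :
    posFrom lst element i = [] := by
  rw [posFrom]; simp [h]

theorem innerA_spec (lst : List Int) (element : Int) (i : Nat) :
    posFrom lst element i =
      if innerA lst element i < lst.length then
        ((innerA lst element i : Nat) : Int) :: posFrom lst element (innerA lst element i + 1)
      else [] := by
  by_cases h : i < lst.length
  · by_cases he : lst[i] = element
    · have hin : innerA lst element i = i := by rw [innerA]; simp [h, he]
      rw [hin, posFrom_hit lst element i h he, if_pos h]
    · have hin : innerA lst element i = innerA lst element (i + 1) := by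
        rw [innerA]; simp [h, he]
      rw [hin, posFrom_miss lst element i h he]
      exact innerA_spec lst element (i + 1)
  · have hin : innerA lst element i = i := by rw [innerA]; simp [h]
    rw [hin, if_neg h, posFrom_end lst element i h]
termination_by lst.length - i

theorem outerA_eq (lst : List Int) (element : Int) (i : Nat) (acc : List (Int × Int)) :
    outerA lst element i acc = acc ++ pairUp (posFrom lst element i) := by
  by_cases h : i < lst.length
  · by_cases he : lst[i] = element
    · have hspec := innerA_spec lst element (i + 1)
      by_cases hj : innerA lst element (i + 1) < lst.length
      · rw [outerA, dif_pos h, if_pos (by simp [he]), if_pos hj]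
        rw [outerA_eq lst element (innerA lst element (i + 1) + 1)]
        rw [posFrom_hit lst element i h he, hspec, if_pos hj]
        simp [pairUp]
      · rw [outerA, dif_pos h, if_pos (by simp [he]), if_neg hj]
        rw [outerA_eq lst element (innerA lst element (i + 1) + 1)]
        rw [posFrom_hit lst element i h he, hspec, if_neg hj]
        rw [posFrom_end lst element _ (by omega)]
        simp [pairUp]
    · rw [outerA, dif_pos h, if_neg (by simp [he])]
      rw [outerA_eq lst element (i + 1)]
      rw [posFrom_miss lst element i h he]
  · rw [outerA, dif_neg h, posFrom_end lst element i h]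
    simp [pairUp]
termination_by lst.length - i
decreasing_by
  · have := innerA_ge lst element (i + 1); omega
  · have := innerA_ge lst element (i + 1); omega
  · omega

-- pending state rendered as a prefix of the occurrence list
def pendList : Option Int → List Int
  | none => []
  | some v => [v]

theorem foldB_eq (element : Int) (xs : List Int) (s : Int) (acc : List (Int × Int))
    (pending : Option Int) :
    ((PySem.List.enumerate xs s).foldl (stepB element) (acc, pending)).1 =
      acc ++ pairUp (pendList pending ++ posL element xs s) := by
  induction xs generalizing s acc pending with
  | nil =>
    cases pending <;> simp [PySem.List.enumerate_nil, posL, pendList, pairUp]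
  | cons x t ih =>
    rw [PySem.List.enumerate_cons, List.foldl_cons]
    by_cases he : x = element
    · cases pending with
      | none =>
        rw [show stepB element (acc, none) (s, x) = (acc, some s) by simp [stepB, he]]
        rw [ih]
        simp [posL, he, pendList]
      | some v =>
        rw [show stepB element (acc, some v) (s, x) = (acc ++ [(v, s)], none) by
          simp [stepB, he]]
        rw [ih]
        simp [posL, he, pendList, pairUp]
    · rw [show stepB element (acc, pending) (s, x) = (acc, pending) by simp [stepB, he]]
      rw [ih]
      simp [posL, he]

theorem posFrom_eq_posL (lst : List Int) (element : Int) (i : Nat) :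
    posFrom lst element i = posL element (lst.drop i) (i : Int) := by
  by_cases h : i < lst.length
  · rw [List.drop_eq_getElem_cons h]
    have ih := posFrom_eq_posL lst element (i + 1)
    by_cases he : lst[i] = element
    · rw [posFrom_hit lst element i h he, ih]
      simp [posL, he]
    · rw [posFrom_miss lst element i h he, ih]
      simp [posL, he]
  · rw [posFrom_end lst element i h, List.drop_of_length_le (by omega)]
    simp [posL]
termination_by lst.length - i

-- ===== VERDICT (by name: the statement is the Claim_ definition above) =====
theorem find_intervals_same_spec : Claim_equal_find_intervals_same := by
  intro lst element _
  unfold Spec_find_intervals_same find_intervals_same find_intervals_same_alt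
  rw [outerA_eq, foldB_eq]
  rw [posFrom_eq_posL lst element 0]
  simp [pendList]
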